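-- pv_equiv track=rewrite | github.com/funasako/JASCO | bin/ir.py | extract_xy_data
-- ===== SOURCE A (Python) =====
-- def extract_xy_data(content):
--     xy_start = content.index("XYDATA") + 1 #開始行は固定
--     xy_end = None #終了行は以下のように分岐
--     # '##### Extended Information'があれば、その2行上
--     extended_info_index = next((i for i, line in enumerate(content) if '##### Extended Information' in line), None)
--     if extended_info_index is not None:
--         xy_end = extended_info_index - 2  # 2行上にする
--     else:
--         # 空行があれば、その1行上
--         empty_line_index = next((i for i, line in enumerate(content) if line.strip() == ""), None)
--         if empty_line_index is not None:
--             xy_end = empty_line_index - 1  # 1行上にする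
--         else:
--             # 上記どちらでもない場合は、ファイルの最終行
--             xy_end = len(content) - 1  # 最終行
--
--     # データを抽出
--     xy_data_lines = content[xy_start:xy_end + 1]
--
--     return xy_data_lines
-- ===== SOURCE B (Python) =====
-- def extract_xy_data(content):
--     # Different decomposition: instead of computing start/end indices and slicing
--     # once, truncate the file at the computed end-of-data line first, then stream
--     # out everything after the first literal "XYDATA" line of the truncated list.
--     if "XYDATA" not in content:
--         raise ValueError("'XYDATA' is not in list")
--     # Stage 1: truncate at the end marker (extended-info wins over blank line).
--     for i, line in enumerate(content):
--         if '##### Extended Information' in line: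
--             trimmed = content[:i - 1]
--             break
--     else:
--         for i, line in enumerate(content):
--             if line.strip() == "":
--                 trimmed = content[:i]
--                 break
--         else:
--             trimmed = content
--     # Stage 2: emit lines after the marker with a flag accumulator.
--     out = []
--     seen = False
--     for line in trimmed:
--         if seen:
--             out.append(line)
--         elif line == "XYDATA":
--             seen = True
--     return out
-- ===== Notes on version B (the rewrite author's own statement) =====
-- stated objective: alternative
-- what changed: A computes a start index and an end index and takes one slice with index arithmetic; B is a pipeline of list transformations: truncate the list at the computed end line, then stream out everything after the first "XYDATA" line with a boolean-flag accumulator (no index arithmetic on the result).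
import Mathlib
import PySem

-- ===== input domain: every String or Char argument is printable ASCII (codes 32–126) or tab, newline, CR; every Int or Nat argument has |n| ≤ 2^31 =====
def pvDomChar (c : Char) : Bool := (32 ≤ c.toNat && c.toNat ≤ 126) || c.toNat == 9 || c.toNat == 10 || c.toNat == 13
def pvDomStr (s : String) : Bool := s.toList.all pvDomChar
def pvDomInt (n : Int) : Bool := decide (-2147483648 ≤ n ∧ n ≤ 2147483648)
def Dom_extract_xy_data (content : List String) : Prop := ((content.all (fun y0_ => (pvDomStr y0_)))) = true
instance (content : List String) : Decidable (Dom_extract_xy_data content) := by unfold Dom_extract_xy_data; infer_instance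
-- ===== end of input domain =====

-- B replaces A's index arithmetic + single slice by a pipeline: truncate the list at the
-- computed end line, then stream out everything after the first "XYDATA" line; same result.

-- ===== PORT A =====
def extract_xy_data (content : List String) : List String :=
  match PySem.List.index? content "XYDATA" with
  | none => []  -- content.index("XYDATA") raises ValueError here; excluded by Pre_
  | some i =>
    let xy_start : Int := (i : Int) + 1
    let extended_info_index :=
      List.findIdx? (fun line => PySem.Str.isIn "##### Extended Information" line) content
    let xy_end : Int :=
      match extended_info_index with
      | some e => (e : Int) - 2
      | none =>
        match List.findIdx? (fun line => PySem.Str.strip line == "") content with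
        | some j => (j : Int) - 1
        | none => (content.length : Int) - 1
    PySem.List.slice content (some xy_start) (some (xy_end + 1))

-- ===== PORT B =====
-- Source B's enumerate for/else scan: first index (from offset k) where p holds
def pvFindAt (p : String → Bool) : List String → Nat → Option Nat
  | [], _ => none
  | line :: rest, i => if p line then some i else pvFindAt p rest (i + 1)

-- Source B stage 1: truncate content at the end-of-data line
def pvTrim (content : List String) : List String :=
  match pvFindAt (fun line => PySem.Str.isIn "##### Extended Information" line) content 0 with
  | some i => PySem.List.slice content none (some ((i : Int) - 1))
  | none =>
    match pvFindAt (fun line => PySem.Str.strip line == "") content 0 with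
    | some i => PySem.List.slice content none (some (i : Int))
    | none => content

def extract_xy_data_alt (content : List String) : List String :=
  if content.contains "XYDATA" then
    -- Source B stage 2: flag-accumulator loop over the trimmed list
    ((pvTrim content).foldl
      (fun (st : Bool × List String) line =>
        if st.1 then (st.1, st.2 ++ [line])
        else if line == "XYDATA" then (true, st.2) else st)
      (false, [])).2
  else []  -- raise ValueError; excluded by Pre_

-- ===== PRECONDITION & SPEC =====
-- Pre_ excludes exactly the inputs without a line "XYDATA", where A raises ValueError.
def Pre_extract_xy_data (content : List String) : Prop := "XYDATA" ∈ content
instance (content : List String) : Decidable (Pre_extract_xy_data content) := by unfold Pre_extract_xy_data; infer_instance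
def pvWitness_extract_xy_data : List String := ["XYDATA", "1 2", "3 4"]

def Spec_extract_xy_data (content : List String) (out : List String) : Prop := out = extract_xy_data_alt content
instance (content : List String) (out : List String) : Decidable (Spec_extract_xy_data content out) := by unfold Spec_extract_xy_data; infer_instance

-- ===== CLAIM (what is proved, stated in full; the proofs are below) =====
def Claim_equal_extract_xy_data : Prop := ∀ (content : List String), Dom_extract_xy_data content → Pre_extract_xy_data content → Spec_extract_xy_data content (extract_xy_data content)

-- ===== LEMMAS AND PROOFS =====

theorem pvFindAt_eq (p : String → Bool) (l : List String) : ∀ k,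
    pvFindAt p l k = (List.findIdx? p l).map (· + k) := by
  induction l with
  | nil => intro k; simp [pvFindAt]
  | cons a l ih =>
    intro k
    by_cases h : p a = true <;>
      simp [pvFindAt, h, List.findIdx?_cons, ih, Option.map_map, Function.comp_def,
        Nat.add_assoc, Nat.add_comm 1 k]

-- once the flag is set, the loop appends everything
theorem pvFold_true (l : List String) : ∀ acc,
    l.foldl (fun (st : Bool × List String) line =>
        if st.1 then (st.1, st.2 ++ [line])
        else if line == "XYDATA" then (true, st.2) else st) (true, acc) = (true, acc ++ l) := by
  induction l with
  | nil => intro acc; simp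
  | cons a l ih => intro acc; simpa using ih (acc ++ [a])

-- the flag loop returns the suffix after the first "XYDATA", or [] if there is none
theorem pvFold_spec (l : List String) :
    (l.foldl (fun (st : Bool × List String) line =>
        if st.1 then (st.1, st.2 ++ [line])
        else if line == "XYDATA" then (true, st.2) else st) (false, [])).2 =
      match List.findIdx? (fun x => x == "XYDATA") l with
      | some i => l.drop (i + 1)
      | none => [] := by
  induction l with
  | nil => simp
  | cons a l ih =>
    rw [List.foldl_cons]
    by_cases h : (a == "XYDATA") = true
    · rw [if_neg (by simp), if_pos h, pvFold_true]
      simp [List.findIdx?_cons, h]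
    · rw [if_neg (by simp), if_neg h, ih]
      simp only [List.findIdx?_cons, h]
      cases List.findIdx? (fun x => x == "XYDATA") l <;> simp

-- A's list.index as a findIdx?
theorem pvIndex?_eq (content : List String) :
    PySem.List.index? content "XYDATA" = List.findIdx? (fun line => line == "XYDATA") content := by
  rw [PySem.List.index?_eq_idxOf?]
  simp [List.idxOf?]

-- a slice with a Nat start is the no-start slice with that many elements dropped
theorem pvSlice_drop (xs : List String) (s : Nat) (b : Int) :
    PySem.List.slice xs (some (s : Int)) (some b) =
      (PySem.List.slice xs none (some b)).drop s := by
  simp only [PySem.List.slice, PySem.List.clampIdx]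
  have h1 : ¬ ((s : Int) < 0) := by omega
  simp only [h1, if_false, Int.toNat_natCast, List.drop_zero, Nat.sub_zero]
  rw [List.drop_take]
  rcases Nat.le_total s xs.length with hs | hs
  · rw [min_eq_left hs]
  · rw [min_eq_right hs, List.drop_of_length_le hs,
      List.drop_length, List.take_nil, List.take_nil]

-- a no-start slice is a take
theorem pvSlice_take (xs : List String) (b : Int) :
    PySem.List.slice xs none (some b) = xs.take (PySem.List.clampIdx xs.length b) := by
  simp [PySem.List.slice]

-- findIdx? on a prefix: kept if it falls inside, gone otherwise
theorem pvFindIdx_take (p : String → Bool) (xs : List String) :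
    ∀ (m i : Nat), List.findIdx? p xs = some i →
    List.findIdx? p (xs.take m) = if i < m then some i else none := by
  induction xs with
  | nil => intro m i h; simp at h
  | cons a xs ih =>
    intro m i h
    cases m with
    | zero => simp
    | succ m =>
      rw [List.take_succ_cons]
      rw [List.findIdx?_cons] at h ⊢
      by_cases hp : p a = true
      · simp only [hp, if_true] at h ⊢
        obtain rfl : (0 : Nat) = i := by simpa using h
        simp
      · simp only [hp] at h ⊢
        obtain ⟨j, hj, rfl⟩ := Option.map_eq_some_iff.mp h
        rw [ih m j hj]
        by_cases hjm : j < m <;> simp [hjm]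

-- common core: A's slice from xy+1 to b equals B's flag loop over content[:b]
theorem pvMain (content : List String) (xy : Nat) (b : Int)
    (hxy : List.findIdx? (fun line => line == "XYDATA") content = some xy) :
    PySem.List.slice content (some ((xy : Int) + 1)) (some b) =
      ((PySem.List.slice content none (some b)).foldl
        (fun (st : Bool × List String) line =>
          if st.1 then (st.1, st.2 ++ [line])
          else if line == "XYDATA" then (true, st.2) else st)
        (false, [])).2 := by
  rw [pvFold_spec]
  have hcast : ((xy : Int) + 1) = ((xy + 1 : Nat) : Int) := by push_cast; ring
  rw [hcast, pvSlice_drop content (xy + 1) b, pvSlice_take]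
  rw [pvFindIdx_take (fun line => line == "XYDATA") content
    (PySem.List.clampIdx content.length b) xy hxy]
  by_cases hm : xy < PySem.List.clampIdx content.length b
  · simp [hm]
  · simp only [hm, if_false]
    refine List.drop_eq_nil_of_le ?_
    calc (content.take (PySem.List.clampIdx content.length b)).length
        ≤ PySem.List.clampIdx content.length b := by simp
      _ ≤ xy + 1 := by omega

-- ===== VERDICT (by name: the statement is the Claim_ definition above) =====
theorem extract_xy_data_spec : Claim_equal_extract_xy_data := by
  intro content _ hmem
  unfold Spec_extract_xy_data extract_xy_data extract_xy_data_alt pvTrim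
  have hmap : ∀ (o : Option Nat), o.map (· + 0) = o := fun o => by cases o <;> simp
  rw [pvIndex?_eq, pvFindAt_eq, pvFindAt_eq, hmap, hmap,
    if_pos ((List.contains_iff_mem).mpr hmem)]
  cases hxy : List.findIdx? (fun line => line == "XYDATA") content with
  | none =>
    exfalso
    have := List.findIdx?_eq_none_iff.mp hxy "XYDATA" hmem
    simp at this
  | some xy =>
    dsimp only
    cases h1 : List.findIdx? (fun line => PySem.Str.isIn "##### Extended Information" line) content with
    | some e =>
      dsimp only
      have hb : ((e : Int) - 2) + 1 = (e : Int) - 1 := by ring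
      rw [hb]
      exact pvMain content xy ((e : Int) - 1) hxy
    | none =>
      cases h2 : List.findIdx? (fun line => PySem.Str.strip line == "") content with
      | some j =>
        dsimp only
        have hb : ((j : Int) - 1) + 1 = (j : Int) := by ring
        rw [hb]
        exact pvMain content xy (j : Int) hxy
      | none =>
        dsimp only
        have hb : ((content.length : Int) - 1) + 1 = (content.length : Int) := by ring
        have hc : content = PySem.List.slice content none (some (content.length : Int)) := by
          rw [PySem.List.slice_to_natCast, List.take_length]
        rw [hb]
        conv_rhs => rw [hc]
        exact pvMain content xy (content.length : Int) hxy
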